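-- pv_equiv track=rewrite | github.com/BooleanCube/CP | codeforces/appletree.py | dfs
-- ===== SOURCE A (Python) =====
-- def dfs(start_node, graph, leaf_count):
--     stack = [(start_node, None)]
--     visited = set()
--     while stack:
--         node, parent = stack[-1]
--         if node not in visited:
--             visited.add(node)
--             count = 0
--             for neighbor in graph[node]:
--                 if neighbor != parent:
--                     stack.append((neighbor, node))
--             if len(graph[node]) == 1 and parent is not None:
--                 count = 1
--             leaf_count[node] = count
--         else:
--             count = 0
--             for neighbor in graph[node]:
--                 if neighbor != parent:
--                     count += leaf_count[neighbor]
--             if count == 0: count = 1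
--             leaf_count[node] = count
--             stack.pop()
--     return leaf_count[start_node]
-- ===== SOURCE B (Python) =====
-- # Recursive post-order DFS replacing the explicit stack/visited-set machine.
-- # Note: like A, this mutates leaf_count in place; the equivalence claimed is about
-- # the return value (on trees the final leaf_count values coincide as well).
-- def dfs(start_node, graph, leaf_count):
--     def rec(node, parent):
--         count = 0
--         for neighbor in graph[node]:
--             if neighbor != parent:
--                 count += rec(neighbor, node)
--         if count == 0:
--             count = 1
--         leaf_count[node] = count
--         return count
--     return rec(start_node, None)
-- ===== Notes on version B (the rewrite author's own statement) =====
-- stated objective: simpler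
-- what changed: The explicit stack machine with a visited set and a two-phase (push-then-pop) treatment of every node is replaced by a direct recursive post-order DFS rec(node, parent) that sums child results and applies the leaf rule on return.
-- outside the precondition, e.g. on dfs(0, {0: [1, 2], 1: [0, 2], 2: [0, 1]}, {}): A returns 2, B raises RecursionError; on dfs(0, {0: [1, 1], 1: [0, 0, 1]}, {}): A returns 2, B returns 4; on dfs(0, {0: [1, 2], 1: [], 2: [1]}, {}): A returns 2, B returns 2
import Mathlib
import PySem

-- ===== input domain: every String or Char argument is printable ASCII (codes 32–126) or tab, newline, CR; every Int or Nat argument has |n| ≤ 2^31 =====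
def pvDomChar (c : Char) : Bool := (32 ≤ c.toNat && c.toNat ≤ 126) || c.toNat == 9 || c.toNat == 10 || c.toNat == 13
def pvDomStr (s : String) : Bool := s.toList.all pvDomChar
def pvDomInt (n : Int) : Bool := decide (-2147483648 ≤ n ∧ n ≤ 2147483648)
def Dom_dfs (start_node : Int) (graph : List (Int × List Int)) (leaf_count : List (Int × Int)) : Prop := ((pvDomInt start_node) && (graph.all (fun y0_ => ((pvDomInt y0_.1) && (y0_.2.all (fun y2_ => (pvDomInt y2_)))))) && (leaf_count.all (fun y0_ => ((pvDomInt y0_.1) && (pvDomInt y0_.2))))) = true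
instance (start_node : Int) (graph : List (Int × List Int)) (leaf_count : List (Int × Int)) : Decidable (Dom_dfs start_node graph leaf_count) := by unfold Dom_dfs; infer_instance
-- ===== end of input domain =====

-- B replaces A's explicit stack machine (visited set, push/pop two-phase handling of each
-- node) by a direct recursive post-order DFS; same cost, simpler decomposition.  Both
-- Pythons mutate leaf_count in place; the equivalence proved here is about the RETURN value.

-- ===== PORT A =====
-- The Python stack has its top at the END of the list; the port keeps the stack top-FIRST,
-- so Python's `stack.append` is a cons and `stack[-1]`/`stack.pop` act on the head.
-- The while loop is ported with fuel 2*(len+1)*(totalAdj+1), proved sufficient under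
-- Pre_dfs (each explored node enters the stack once per incident self-loop plus once,
-- and every frame is handled at most twice).
-- graph[node] / leaf_count[neighbor] / leaf_count[start_node] raise KeyError in Python for
-- a missing key; Pre_dfs guarantees those keys are present, so getD is exact there.
def dfsLoop (g : PySem.Dict Int (List Int)) : Nat → List (Int × Option Int) → PySem.Set Int → PySem.Dict Int Int → PySem.Dict Int Int
  | 0, _, _, lc => lc
  | _ + 1, [], _, lc => lc
  | fuel + 1, (node, parent) :: rest, visited, lc =>
    if node ∉ visited then
      let count : Int := if (g.getD node []).length = 1 ∧ parent ≠ none then 1 else 0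
      dfsLoop g fuel
        ((g.getD node []).foldl
          (fun st nb => if some nb ≠ parent then (nb, some node) :: st else st)
          ((node, parent) :: rest))
        (PySem.Set.add visited node) (lc.insert node count)
    else
      let count : Int := (g.getD node []).foldl
        (fun c nb => if some nb ≠ parent then c + lc.getD nb 0 else c) 0
      dfsLoop g fuel rest visited (lc.insert node (if count = 0 then 1 else count))

def dfs (start_node : Int) (graph : List (Int × List Int)) (leaf_count : List (Int × Int)) : Int :=
  (dfsLoop (PySem.Dict.mk graph)
      (2 * (graph.length + 1) * ((graph.map (fun q => q.2.length)).sum + 1))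
      [(start_node, none)] PySem.Set.empty (PySem.Dict.mk leaf_count)).getD start_node 0

-- ===== PORT B =====
-- Literal port of Source B's rec(node, parent); the recursion is guarded by fuel
-- ((len+2)^2 bounds the recursion depth whenever the Python recursion terminates:
-- a longer branch would repeat a (node, parent) pair and recurse forever).
def dfsRec (g : PySem.Dict Int (List Int)) : Nat → Int → Option Int → PySem.Dict Int Int → Int × PySem.Dict Int Int
  | 0, _, _, lc => (0, lc)
  | fuel + 1, node, parent, lc =>
    let r := (g.getD node []).foldl
      (fun (r : Int × PySem.Dict Int Int) nb =>
        if some nb ≠ parent then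
          let s := dfsRec g fuel nb (some node) r.2
          (r.1 + s.1, s.2)
        else r) (0, lc)
    let count : Int := if r.1 = 0 then 1 else r.1
    (count, r.2.insert node count)

def dfs_alt (start_node : Int) (graph : List (Int × List Int)) (leaf_count : List (Int × Int)) : Int :=
  (dfsRec (PySem.Dict.mk graph) ((graph.length + 2) * (graph.length + 2))
    start_node none (PySem.Dict.mk leaf_count)).1

-- ===== PRECONDITION & SPEC =====
def chl (g : PySem.Dict Int (List Int)) (n : Int) (p : Option Int) : List Int :=
  (g.getD n []).filter (fun m => some m ≠ p)

def chl2 (g : PySem.Dict Int (List Int)) (n : Int) (p : Option Int) : List Int :=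
  (chl g n p).filter (fun m => m ≠ n)

def walkT (g : PySem.Dict Int (List Int)) : Nat → Int → Option Int → Option (List Int)
  | 0, _, _ => none
  | fuel + 1, n, p =>
    ((chl2 g n p).mapM (fun c => walkT g fuel c (some n))).map (fun ws => n :: ws.flatten)

-- Pre_dfs is a shape condition on the graph (it computes no counts and is used by neither
-- port): the parent-avoiding exploration from start_node — which also ignores self-loops —
-- visits no node twice, stays within graph's keys, and a node carrying a self-loop has no
-- other neighbours (a rooted tree whose nodes may carry pure self-loop bouquets).  Outside
-- it either Python A raises KeyError, or B's recursion revisits nodes — diverging with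
-- RecursionError on cyclic graphs — while A's visited-set guard still returns a value
-- (on some excluded multigraphs the two still agree, see the excluded examples).
def Pre_dfs (start_node : Int) (graph : List (Int × List Int)) (leaf_count : List (Int × Int)) : Prop :=
  (walkT (PySem.Dict.mk graph) (graph.length + 1) start_node none).isSome = true ∧
  ((walkT (PySem.Dict.mk graph) (graph.length + 1) start_node none).getD []).Nodup ∧
  (∀ m ∈ (walkT (PySem.Dict.mk graph) (graph.length + 1) start_node none).getD [],
    (PySem.Dict.mk graph).contains m = true) ∧
  (∀ m ∈ (walkT (PySem.Dict.mk graph) (graph.length + 1) start_node none).getD [],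
    m ∈ (PySem.Dict.mk graph).getD m [] →
      ∀ x ∈ (PySem.Dict.mk graph).getD m [], x = m)

instance (start_node : Int) (graph : List (Int × List Int)) (leaf_count : List (Int × Int)) : Decidable (Pre_dfs start_node graph leaf_count) := by unfold Pre_dfs; infer_instance

def pvWitness_dfs : Int × (List (Int × List Int)) × (List (Int × Int)) :=
  (0, [(0, [1, 2]), (1, [0]), (2, [0])], [])

def Spec_dfs (start_node : Int) (graph : List (Int × List Int)) (leaf_count : List (Int × Int)) (out : Int) : Prop := out = dfs_alt start_node graph leaf_count
instance (start_node : Int) (graph : List (Int × List Int)) (leaf_count : List (Int × Int)) (out : Int) : Decidable (Spec_dfs start_node graph leaf_count out) := by unfold Spec_dfs; infer_instance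

-- ===== CLAIM (what is proved, stated in full; the proofs are below) =====
def Claim_equal_dfs : Prop := ∀ (start_node : Int) (graph : List (Int × List Int)) (leaf_count : List (Int × Int)), Dom_dfs start_node graph leaf_count → Pre_dfs start_node graph leaf_count → Spec_dfs start_node graph leaf_count (dfs start_node graph leaf_count)

-- ===== LEMMAS AND PROOFS =====

def SelfOK (g : PySem.Dict Int (List Int)) (w : List Int) : Prop :=
  ∀ m ∈ w, m ∈ g.getD m [] → ∀ x ∈ g.getD m [], x = m

def cnt (g : PySem.Dict Int (List Int)) : Nat → Int → Option Int → Int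
  | 0, _, _ => 0
  | fuel + 1, n, p =>
    let s : Int := ((chl2 g n p).map (fun c => cnt g fuel c (some n))).sum
      + ((chl g n p).count n : Int)
    if s = 0 then 1 else s

def upds (g : PySem.Dict Int (List Int)) : Nat → Int → Option Int → List (Int × Int)
  | 0, _, _ => []
  | fuel + 1, n, p =>
    (n, cnt g (fuel + 1) n p) :: (chl2 g n p).flatMap (fun c => upds g fuel c (some n))

def cost (g : PySem.Dict Int (List Int)) : Nat → Int → Option Int → Nat
  | 0, _, _ => 0
  | fuel + 1, n, p =>
    2 + (chl g n p).count n + ((chl2 g n p).map (fun c => cost g fuel c (some n))).sum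

theorem get?_mk_eq_lookup {ν : Type} (L : List (Int × ν)) (k : Int) :
    (PySem.Dict.mk L).get? k = L.lookup k := by
  induction L with
  | nil => rfl
  | cons h t ih =>
    rcases h with ⟨a, b⟩
    rw [PySem.Dict.get?_mk_cons, List.lookup]
    by_cases hk : k = a
    · simp [hk]
    · have hba : (a == k) = false := by simp [Ne.symm hk]
      have hba2 : (k == a) = false := by simp [hk]
      simp [hba, hba2, ih]

theorem or_swap_of_none {o₁ o₂ o₃ : Option Int} (h : o₁ = none ∨ o₂ = none) :
    o₁.or (o₂.or o₃) = o₂.or (o₁.or o₃) := by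
  rcases h with h | h
  · subst h; cases o₂ <;> simp
  · subst h; cases o₁ <;> simp

theorem mapM_option_forall₂ {α β : Type} (f : α → Option β) :
    ∀ xs ys, xs.mapM f = some ys → List.Forall₂ (fun x y => f x = some y) xs ys := by
  intro xs
  induction xs with
  | nil => intro ys h; simp [List.mapM_nil] at h; subst h; exact List.Forall₂.nil
  | cons x t ih =>
    intro ys h
    rw [List.mapM_cons] at h
    cases hf : f x with
    | none => simp [hf] at h
    | some y =>
      cases ht : t.mapM f with
      | none => simp [hf, ht] at h
      | some ys' =>
        simp [hf, ht] at h
        subst h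
        exact List.Forall₂.cons hf (ih ys' ht)

theorem walk_head (g : PySem.Dict Int (List Int)) (f : Nat) (n : Int) (p : Option Int) (w : List Int)
    (h : walkT g f n p = some w) : ∃ t, w = n :: t := by
  cases f with
  | zero => simp [walkT] at h
  | succ f =>
    simp only [walkT, Option.map_eq_some_iff] at h
    obtain ⟨ws, -, rfl⟩ := h
    exact ⟨ws.flatten, rfl⟩

theorem mem_flatten_of_forall₂ (g : PySem.Dict Int (List Int)) (f : Nat) (n : Int) :
    ∀ cs ws, List.Forall₂ (fun c wc => walkT g f c (some n) = some wc) cs ws →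
      ∀ c ∈ cs, c ∈ ws.flatten := by
  intro cs ws h
  induction h with
  | nil => intro c hc; simp at hc
  | cons hc h ih =>
    intro c hmem
    rcases List.mem_cons.mp hmem with rfl | hmem
    · obtain ⟨t, rfl⟩ := walk_head _ _ _ _ _ hc
      simp
    · simp only [List.flatten_cons, List.mem_append]
      exact Or.inr (ih c hmem)

theorem upds_keys_aux (g : PySem.Dict Int (List Int)) (f : Nat) (n : Int)
    (ih : ∀ n' p' w', walkT g f n' p' = some w' → (upds g f n' p').map Prod.fst = w') :
    ∀ cs ws, List.Forall₂ (fun c wc => walkT g f c (some n) = some wc) cs ws →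
      cs.flatMap (fun a => (upds g f a (some n)).map Prod.fst) = ws.flatten := by
  intro cs ws h
  induction h with
  | nil => simp
  | cons hc h ih₂ => simp [List.flatMap_cons, ih _ _ _ hc, ih₂]

theorem upds_keys (g : PySem.Dict Int (List Int)) :
    ∀ f n p w, walkT g f n p = some w → (upds g f n p).map Prod.fst = w := by
  intro f
  induction f with
  | zero => intro n p w h; simp [walkT] at h
  | succ f ih =>
    intro n p w h
    simp only [walkT, Option.map_eq_some_iff] at h
    obtain ⟨ws, hws, rfl⟩ := h
    have h₂ := mapM_option_forall₂ _ _ _ hws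
    simp only [upds, List.map_cons, List.map_flatMap]
    congr 1
    exact upds_keys_aux g f n ih _ _ h₂

theorem upds_keys_flatMap (g : PySem.Dict Int (List Int)) (f : Nat) (n : Int) :
    ∀ cs ws, List.Forall₂ (fun c wc => walkT g f c (some n) = some wc) cs ws →
      (cs.flatMap (fun c => upds g f c (some n))).map Prod.fst = ws.flatten := by
  intro cs ws h
  induction h with
  | nil => simp
  | cons hc h ih => simp [List.flatMap_cons, List.map_append, upds_keys _ _ _ _ _ hc, ih]

theorem lookup_upds_self (g : PySem.Dict Int (List Int)) (f : Nat) (n : Int) (p : Option Int) (w : List Int)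
    (h : walkT g f n p = some w) : (upds g f n p).lookup n = some (cnt g f n p) := by
  cases f with
  | zero => simp [walkT] at h
  | succ f => simp [upds]

theorem lookup_none_of_not_mem_keys {L : List (Int × Int)} {m : Int}
    (h : m ∉ L.map Prod.fst) : L.lookup m = none := by
  rw [List.lookup_eq_none_iff]
  intro p hp
  simp only [bne_iff_ne, ne_eq]
  intro hmp
  exact h (hmp ▸ List.mem_map_of_mem hp)

theorem lookup_perm_of_nodup {A B : List (Int × Int)} (h : A.Perm B)
    (hn : (A.map Prod.fst).Nodup) (k : Int) : A.lookup k = B.lookup k := by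
  rw [← get?_mk_eq_lookup, ← get?_mk_eq_lookup]
  have hnB : (B.map Prod.fst).Nodup := ((h.map Prod.fst).nodup_iff).mp hn
  cases cA : (PySem.Dict.mk A).get? k with
  | some v =>
    have hm : (k, v) ∈ A := (PySem.Dict.get?_eq_some_iff_mem_items _ _ _ hn).mp cA
    exact ((PySem.Dict.get?_eq_some_iff_mem_items _ _ _ hnB).mpr (h.mem_iff.mp hm)).symm
  | none =>
    cases cB : (PySem.Dict.mk B).get? k with
    | none => rfl
    | some v =>
      have hm : (k, v) ∈ B := (PySem.Dict.get?_eq_some_iff_mem_items _ _ _ hnB).mp cB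
      rw [(PySem.Dict.get?_eq_some_iff_mem_items (PySem.Dict.mk A) k v hn).mpr (h.mem_iff.mpr hm)] at cA
      simp at cA

theorem foldl_ite_filter {β : Type} (p : Option Int) (h : Int → β → β) :
    ∀ (l : List Int) (init : β),
      l.foldl (fun st nb => if some nb ≠ p then h nb st else st) init
        = (l.filter (fun m => some m ≠ p)).foldl (fun st nb => h nb st) init := by
  intro l
  induction l with
  | nil => intro init; rfl
  | cons x t ih =>
    intro init
    simp only [List.foldl_cons, List.filter_cons]
    by_cases hx : some x = p
    · rw [if_neg (fun hc => hc hx), if_neg (by simp [hx])]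
      exact ih init
    · rw [if_pos hx, if_pos (by simp [hx])]
      exact ih (h x init)

theorem lookup_flatMap_self (g : PySem.Dict Int (List Int)) (f : Nat) (n : Int) :
    ∀ cs ws, List.Forall₂ (fun c wc => walkT g f c (some n) = some wc) cs ws →
      ws.flatten.Nodup →
      ∀ c ∈ cs, (cs.flatMap (fun c => upds g f c (some n))).lookup c
        = some (cnt g f c (some n)) := by
  intro cs ws h
  induction h with
  | nil => intro _ c hc; simp at hc
  | @cons c0 wc cs' ws' hc0 h ih =>
    intro hnd c hmem
    rw [List.flatMap_cons, List.lookup_append]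
    have hnd' := (List.nodup_append.mp hnd)
    rcases List.mem_cons.mp hmem with rfl | hmem
    · rw [lookup_upds_self g f c (some n) wc hc0]
      rfl
    · have hcflat : c ∈ ws'.flatten := mem_flatten_of_forall₂ g f n cs' ws' h c hmem
      have hcwc : c ∉ wc := fun hin => (hnd'.2.2 _ hin _ hcflat) rfl
      rw [lookup_none_of_not_mem_keys (by rw [upds_keys g f c0 (some n) wc hc0]; exact hcwc)]
      simp only [Option.none_or]
      exact ih hnd'.2.1 c hmem


-- ===== pure-self-loop node facts =====
theorem pure_chl (g : PySem.Dict Int (List Int)) (n : Int) (p : Option Int)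
    (hall : ∀ x ∈ g.getD n [], x = n) (hp : p ≠ some n) : chl g n p = g.getD n [] := by
  unfold chl
  apply List.filter_eq_self.mpr
  intro x hx
  rw [hall x hx]
  simpa using fun hc => hp hc.symm

theorem pure_chl_self (g : PySem.Dict Int (List Int)) (n : Int)
    (hall : ∀ x ∈ g.getD n [], x = n) : chl g n (some n) = [] := by
  unfold chl
  apply List.filter_eq_nil_iff.mpr
  intro x hx
  rw [hall x hx]
  simp

theorem pure_chl2 (g : PySem.Dict Int (List Int)) (n : Int) (p : Option Int)
    (hall : ∀ x ∈ g.getD n [], x = n) : chl2 g n p = [] := by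
  unfold chl2
  apply List.filter_eq_nil_iff.mpr
  intro x hx
  unfold chl at hx
  have := hall x (List.mem_of_mem_filter hx)
  simp [this]

theorem selffree_chl2 (g : PySem.Dict Int (List Int)) (n : Int) (p : Option Int)
    (hself : n ∉ g.getD n []) : chl2 g n p = chl g n p := by
  unfold chl2
  apply List.filter_eq_self.mpr
  intro x hx
  unfold chl at hx
  have hmem : x ∈ g.getD n [] := List.mem_of_mem_filter hx
  have : x ≠ n := fun he => hself (he ▸ hmem)
  simp [this]

theorem selffree_count (g : PySem.Dict Int (List Int)) (n : Int) (p : Option Int)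
    (hself : n ∉ g.getD n []) : (chl g n p).count n = 0 := by
  apply List.count_eq_zero.mpr
  intro hmem
  unfold chl at hmem
  exact hself (List.mem_of_mem_filter hmem)

-- B-side: the fold of dfsRec over an all-n adjacency (pure self-loop node)
theorem recB_fold_pure (g : PySem.Dict Int (List Int)) (n : Int) (p : Option Int)
    (fr : Nat) (hp : p ≠ some n) (hfr : fr ≠ 0) (hall : ∀ x ∈ g.getD n [], x = n) :
    ∀ (l : List Int) (a0 : Int) (lc : PySem.Dict Int Int), (∀ x ∈ l, x = n) →
      l.foldl (fun (r : Int × PySem.Dict Int Int) nb =>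
          if some nb ≠ p then
            ((r.1 + (dfsRec g fr nb (some n) r.2).1, (dfsRec g fr nb (some n) r.2).2)
              : Int × PySem.Dict Int Int)
          else r) (a0, lc)
        = (a0 + l.length, if l.isEmpty then lc else lc.insert n 1) := by
  have hstep : ∀ lc₂ : PySem.Dict Int Int,
      dfsRec g fr n (some n) lc₂ = (1, lc₂.insert n 1) := by
    intro lc₂
    cases fr with
    | zero => exact absurd rfl hfr
    | succ fr' =>
      show dfsRec g (fr' + 1) n (some n) lc₂ = _
      simp only [dfsRec]
      rw [foldl_ite_filter (some n)
        (fun nb (r : Int × PySem.Dict Int Int) =>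
          (r.1 + (dfsRec g fr' nb (some n) r.2).1, (dfsRec g fr' nb (some n) r.2).2))]
      rw [show ((g.getD n []).filter (fun m => some m ≠ some n)) = chl g n (some n) from rfl,
        pure_chl_self g n hall]
      simp
  intro l
  induction l with
  | nil => intro a0 lc _; simp
  | cons x t ih =>
    intro a0 lc hx
    have hx0 : x = n := hx x (by simp)
    rw [List.foldl_cons, hx0, if_pos (fun hc => hp hc.symm)]
    rw [hstep lc]
    rw [ih (a0 + 1) (lc.insert n 1) (fun y hy => hx y (by simp [hy]))]
    have h2 : (if t.isEmpty then lc.insert n 1 else (lc.insert n 1).insert n 1)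
        = lc.insert n 1 := by
      split
      · rfl
      · rw [PySem.Dict.insert_insert_self]
    rw [h2]
    simp only [List.isEmpty_cons, List.length_cons, Prod.mk.injEq]
    refine ⟨by push_cast; ring, by simp⟩

theorem recB_pure (g : PySem.Dict Int (List Int)) (n : Int) (p : Option Int) (fr : Nat)
    (lc : PySem.Dict Int Int) (hp : p ≠ some n) (hfr : 2 ≤ fr)
    (hself : n ∈ g.getD n []) (hall : ∀ x ∈ g.getD n [], x = n) :
    dfsRec g fr n p lc
      = (((g.getD n []).length : Int), lc.insert n ((g.getD n []).length : Int)) := by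
  cases fr with
  | zero => omega
  | succ fr' =>
    show dfsRec g (fr' + 1) n p lc = _
    simp only [dfsRec]
    rw [recB_fold_pure g n p fr' hp (by omega) hall (g.getD n []) 0 lc (fun x hx => hall x hx)]
    have hne : ((g.getD n []).isEmpty) = false := by
      cases h : g.getD n [] with
      | nil => rw [h] at hself; simp at hself
      | cons a t => simp
    rw [hne]
    have hlen : (0 : Int) + ((g.getD n []).length : Int) = ((g.getD n []).length : Int) := by ring
    have hpos : ((g.getD n []).length : Int) ≠ 0 := by
      have := List.length_pos_of_mem hself
      omega
    rw [hlen, if_neg hpos]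
    simp [PySem.Dict.insert_insert_self]

theorem recB_fold (g : PySem.Dict Int (List Int)) (f : Nat) (n : Int) (fr : Nat)
    (hfr : f + 1 ≤ fr)
    (IH : ∀ n' p' w' lc' fr', walkT g f n' p' = some w' → w'.Nodup → SelfOK g w' →
      p' ≠ some n' → f + 1 ≤ fr' →
      (dfsRec g fr' n' p' lc').1 = cnt g f n' p' ∧
      ∀ m, (dfsRec g fr' n' p' lc').2.get? m = ((upds g f n' p').lookup m).or (lc'.get? m)) :
    ∀ cs ws, List.Forall₂ (fun c wc => walkT g f c (some n) = some wc) cs ws →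
      ws.flatten.Nodup → SelfOK g ws.flatten → (∀ c ∈ cs, c ≠ n) →
      ∀ (a0 : Int) (lc : PySem.Dict Int Int),
      (cs.foldl (fun (r : Int × PySem.Dict Int Int) nb =>
          (r.1 + (dfsRec g fr nb (some n) r.2).1, (dfsRec g fr nb (some n) r.2).2)) (a0, lc)).1
        = a0 + (cs.map (fun c => cnt g f c (some n))).sum ∧
      ∀ m, (cs.foldl (fun (r : Int × PySem.Dict Int Int) nb =>
          (r.1 + (dfsRec g fr nb (some n) r.2).1, (dfsRec g fr nb (some n) r.2).2)) (a0, lc)).2.get? m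
        = ((cs.flatMap (fun c => upds g f c (some n))).lookup m).or (lc.get? m) := by
  intro cs ws h
  induction h with
  | nil => intro _ _ _ a0 lc; simp
  | @cons c0 wc cs' ws' hc0 h ih =>
    intro hnd hso hne a0 lc
    have hnd' := List.nodup_append.mp (by simpa using hnd)
    have hso1 : SelfOK g wc := fun m hm => hso m (by simp [hm])
    have hso2 : SelfOK g ws'.flatten := fun m hm => hso m (by simp [hm])
    have hpc : (some n : Option Int) ≠ some c0 :=
      fun hc => hne c0 (by simp) (Option.some.inj hc).symm
    obtain ⟨hr1, hr2⟩ := IH c0 (some n) wc lc fr hc0 hnd'.1 hso1 hpc hfr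
    obtain ⟨ih1, ih2⟩ := ih hnd'.2.1 hso2 (fun c hc => hne c (by simp [hc]))
      (a0 + (dfsRec g fr c0 (some n) lc).1) (dfsRec g fr c0 (some n) lc).2
    constructor
    · rw [List.foldl_cons, ih1, hr1]
      simp [add_assoc]
    · intro m
      rw [List.foldl_cons, ih2 m, hr2 m, List.flatMap_cons, List.lookup_append]
      rw [Option.or_assoc]
      apply or_swap_of_none
      by_cases hm : m ∈ wc
      · left
        apply lookup_none_of_not_mem_keys
        rw [upds_keys_flatMap g f n cs' ws' h]
        exact fun hin => (hnd'.2.2 _ hm _ hin) rfl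
      · right
        apply lookup_none_of_not_mem_keys
        rw [upds_keys g f c0 (some n) wc hc0]
        exact hm

theorem pure_cnt (g : PySem.Dict Int (List Int)) (f : Nat) (n : Int) (p : Option Int)
    (hp : p ≠ some n) (hself : n ∈ g.getD n []) (hall : ∀ x ∈ g.getD n [], x = n) :
    cnt g (f + 1) n p = ((g.getD n []).length : Int) := by
  simp only [cnt, pure_chl2 g n p hall, pure_chl g n p hall hp]
  have hc : (g.getD n []).count n = (g.getD n []).length :=
    List.count_eq_length.mpr (fun b hb => (hall b hb).symm)
  rw [hc]
  have hpos : ((g.getD n []).length : Int) ≠ 0 := by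
    have := List.length_pos_of_mem hself
    omega
  simp only [List.map_nil, List.sum_nil, zero_add]
  rw [if_neg hpos]

theorem recB_spec (g : PySem.Dict Int (List Int)) :
    ∀ f n p w lc fr, walkT g f n p = some w → w.Nodup → SelfOK g w → p ≠ some n →
      f + 1 ≤ fr →
      (dfsRec g fr n p lc).1 = cnt g f n p ∧
      ∀ m, (dfsRec g fr n p lc).2.get? m = ((upds g f n p).lookup m).or (lc.get? m) := by
  intro f
  induction f with
  | zero => intro n p w lc fr h; simp [walkT] at h
  | succ f ih =>
    intro n p w lc fr h hnd hso hp hfr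
    have IH : ∀ n' p' w' lc' fr', walkT g f n' p' = some w' → w'.Nodup → SelfOK g w' →
        p' ≠ some n' → f + 1 ≤ fr' →
        (dfsRec g fr' n' p' lc').1 = cnt g f n' p' ∧
        ∀ m, (dfsRec g fr' n' p' lc').2.get? m = ((upds g f n' p').lookup m).or (lc'.get? m) :=
      fun n' p' w' lc' fr' h' h1 h2 h3 h4 => ih n' p' w' lc' fr' h' h1 h2 h3 h4
    simp only [walkT, Option.map_eq_some_iff] at h
    obtain ⟨ws, hws, rfl⟩ := h
    have h₂ := mapM_option_forall₂ _ _ _ hws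
    have hnd' : ws.flatten.Nodup := (List.nodup_cons.mp hnd).2
    have hsoflat : SelfOK g ws.flatten := fun m hm => hso m (by simp [hm])
    by_cases hself : n ∈ g.getD n []
    · -- pure self-loop node
      have hall : ∀ x ∈ g.getD n [], x = n := hso n (by simp) hself
      have hk0 : chl g n p = g.getD n [] := pure_chl g n p hall (fun hc => hp hc)
      have hc2 : chl2 g n p = [] := pure_chl2 g n p hall
      rw [recB_pure g n p fr lc hp (by omega) hself hall]
      have hcnt := pure_cnt g f n p hp hself hall
      constructor
      · exact hcnt.symm
      · intro m
        simp only [upds, hc2, List.flatMap_nil]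
        rw [PySem.Dict.get?_insert, hcnt]
        by_cases hm : m = n
        · subst hm; simp [List.lookup]
        · have hb : ((m == n) : Bool) = false := by simp [hm]
          simp [List.lookup, hb, hm]
    · -- self-free node: children are exactly chl2 = chl
      cases fr with
      | zero => omega
      | succ fr' =>
        have hfr' : f + 1 ≤ fr' := by omega
        have hchl : chl2 g n p = chl g n p := selffree_chl2 g n p hself
        have hfold : ((g.getD n []).foldl
            (fun (r : Int × PySem.Dict Int Int) nb =>
              if some nb ≠ p then
                ((r.1 + (dfsRec g fr' nb (some n) r.2).1, (dfsRec g fr' nb (some n) r.2).2)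
                  : Int × PySem.Dict Int Int)
              else r) ((0 : Int), lc))
            = (chl2 g n p).foldl (fun (r : Int × PySem.Dict Int Int) nb =>
                (r.1 + (dfsRec g fr' nb (some n) r.2).1, (dfsRec g fr' nb (some n) r.2).2)) (0, lc) := by
          rw [foldl_ite_filter p _ _ _]
          rw [show ((g.getD n []).filter (fun m => some m ≠ p)) = chl g n p from rfl, ← hchl]
        have hne : ∀ c ∈ chl2 g n p, c ≠ n := by
          intro c hc
          unfold chl2 at hc
          simpa using List.of_mem_filter hc
        obtain ⟨f1, f2⟩ := recB_fold g f n fr' hfr' IH _ _ h₂ hnd' hsoflat hne 0 lc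
        have hcnt0 : ((chl g n p).count n : Int) = 0 := by
          rw [selffree_count g n p hself]; rfl
        constructor
        · show (dfsRec g (fr' + 1) n p lc).1 = cnt g (f + 1) n p
          simp only [dfsRec, hfold, cnt, hcnt0]
          rw [f1]
          simp
        · intro m
          show (dfsRec g (fr' + 1) n p lc).2.get? m = _
          simp only [dfsRec, hfold, upds]
          rw [PySem.Dict.get?_insert]
          by_cases hm : m = n
          · subst hm
            rw [if_pos rfl, f1]
            simp only [List.lookup, cnt, hcnt0]
            simp
          · rw [if_neg hm, f2 m]
            have hb : ((m == n) : Bool) = false := by simp [hm]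
            simp only [List.lookup, hb]

theorem pure_frames (g : PySem.Dict Int (List Int)) (n : Int)
    (hall : ∀ x ∈ g.getD n [], x = n) :
    ∀ (j F : Nat) (stack' : List (Int × Option Int)) (vis : PySem.Set Int)
      (lcx : PySem.Dict Int Int), n ∈ vis →
      dfsLoop g (F + j) (List.replicate j (n, some n) ++ stack') vis lcx
        = dfsLoop g F stack' vis (if j = 0 then lcx else lcx.insert n 1) := by
  intro j
  induction j with
  | zero => intro F stack' vis lcx _; simp
  | succ j ih =>
    intro F stack' vis lcx hvis
    rw [show F + (j + 1) = (F + j) + 1 from rfl, List.replicate_succ, List.cons_append]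
    simp only [dfsLoop]
    rw [if_neg (fun hc => hc hvis)]
    have hcount : (g.getD n []).foldl
        (fun c nb => if some nb ≠ some n then c + lcx.getD nb 0 else c) 0 = (0 : Int) := by
      rw [foldl_ite_filter (some n) (fun nb c => c + lcx.getD nb 0)]
      rw [show ((g.getD n []).filter (fun m => some m ≠ some n)) = chl g n (some n) from rfl,
        pure_chl_self g n hall]
      rfl
    rw [hcount]
    norm_num
    rw [ih F stack' vis (lcx.insert n 1) hvis]
    cases j with
    | zero => simp
    | succ j' => simp [PySem.Dict.insert_insert_self]

theorem pure_count_fold (g : PySem.Dict Int (List Int)) (n : Int) (p : Option Int)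
    (hall : ∀ x ∈ g.getD n [], x = n) (hp : p ≠ some n) (lc : PySem.Dict Int Int)
    (h1 : lc.getD n 0 = 1) :
    (g.getD n []).foldl (fun c nb => if some nb ≠ p then c + lc.getD nb 0 else c) 0
      = ((g.getD n []).length : Int) := by
  rw [foldl_ite_filter p (fun nb c => c + lc.getD nb 0)]
  rw [show ((g.getD n []).filter (fun m => some m ≠ p)) = chl g n p from rfl,
    pure_chl g n p hall hp]
  rw [PySem.List.foldl_add (g.getD n []) (fun nb => lc.getD nb 0) 0, zero_add]
  have hm : (g.getD n []).map (fun nb => lc.getD nb 0)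
      = (g.getD n []).map (fun _ => (1 : Int)) := by
    apply List.map_congr_left
    intro x hx
    rw [hall x hx, h1]
  rw [hm, List.map_const']
  simp

theorem frames_sim (g : PySem.Dict Int (List Int)) (f : Nat) (n : Int)
    (IH : ∀ n' p' w', walkT g f n' p' = some w' → w'.Nodup → SelfOK g w' → p' ≠ some n' →
      ∀ (vis : PySem.Set Int), (∀ m ∈ w', m ∉ vis) → ∀ lc rest F, ∃ vis' lc',
        dfsLoop g (F + cost g f n' p') ((n', p') :: rest) vis lc = dfsLoop g F rest vis' lc' ∧
        (∀ m, m ∈ vis' ↔ m ∈ vis ∨ m ∈ w') ∧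
        (∀ m, lc'.get? m = ((upds g f n' p').lookup m).or (lc.get? m))) :
    ∀ cs ws, List.Forall₂ (fun c wc => walkT g f c (some n) = some wc) cs ws →
      ws.flatten.Nodup → SelfOK g ws.flatten → (∀ c ∈ cs, c ≠ n) →
      ∀ (vis : PySem.Set Int), (∀ m ∈ ws.flatten, m ∉ vis) → ∀ lc stack' F, ∃ vis' lc',
        dfsLoop g (F + (cs.map (fun c => cost g f c (some n))).sum)
            (cs.map (fun c => (c, some n)) ++ stack') vis lc
          = dfsLoop g F stack' vis' lc' ∧
        (∀ m, m ∈ vis' ↔ m ∈ vis ∨ m ∈ ws.flatten) ∧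
        (∀ m, lc'.get? m = ((cs.flatMap (fun c => upds g f c (some n))).lookup m).or (lc.get? m)) := by
  intro cs ws h
  induction h with
  | nil =>
    intro _ _ _ vis _ lc stack' F
    exact ⟨vis, lc, by simp, by simp, by simp⟩
  | @cons c0 wc cs' ws' hc0 h ih =>
    intro hnd hso hne vis hdisj lc stack' F
    have hnd' := List.nodup_append.mp (by simpa using hnd)
    have hso1 : SelfOK g wc := fun m hm => hso m (by simp [hm])
    have hso2 : SelfOK g ws'.flatten := fun m hm => hso m (by simp [hm])
    have hpc : (some n : Option Int) ≠ some c0 :=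
      fun hc => hne c0 (by simp) (Option.some.inj hc).symm
    obtain ⟨vis₁, lc₁, eq₁, mem₁, look₁⟩ :=
      IH c0 (some n) wc hc0 hnd'.1 hso1 hpc vis
        (fun m hm => hdisj m (by simp [hm])) lc (cs'.map (fun c => (c, some n)) ++ stack')
        (F + (cs'.map (fun c => cost g f c (some n))).sum)
    have hdisj₁ : ∀ m ∈ ws'.flatten, m ∉ vis₁ := by
      intro m hm hin
      rcases (mem₁ m).mp hin with hv | hwc
      · exact hdisj m (by simp [hm]) hv
      · exact (hnd'.2.2 _ hwc _ hm) rfl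
    obtain ⟨vis₂, lc₂, eq₂, mem₂, look₂⟩ :=
      ih hnd'.2.1 hso2 (fun c hc => hne c (by simp [hc])) vis₁ hdisj₁ lc₁ stack' F
    refine ⟨vis₂, lc₂, ?_, ?_, ?_⟩
    · have e : F + ((c0 :: cs').map (fun c => cost g f c (some n))).sum
          = (F + (cs'.map (fun c => cost g f c (some n))).sum) + cost g f c0 (some n) := by
        simp [List.map_cons]; ring
      rw [e, List.map_cons, List.cons_append, eq₁, eq₂]
    · intro m
      rw [mem₂ m, mem₁ m]
      simp [List.flatten_cons, or_assoc]
    · intro m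
      rw [look₂ m, look₁ m, List.flatMap_cons, List.lookup_append, Option.or_assoc]
      apply or_swap_of_none
      by_cases hm : m ∈ wc
      · left
        apply lookup_none_of_not_mem_keys
        rw [upds_keys_flatMap g f n cs' ws' h]
        exact fun hin => (hnd'.2.2 _ hm _ hin) rfl
      · right
        apply lookup_none_of_not_mem_keys
        rw [upds_keys g f c0 (some n) wc hc0]
        exact hm

theorem loop_sim (g : PySem.Dict Int (List Int)) :
    ∀ f n p w, walkT g f n p = some w → w.Nodup → SelfOK g w → p ≠ some n →
      ∀ (vis : PySem.Set Int), (∀ m ∈ w, m ∉ vis) → ∀ lc rest F,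
      ∃ vis' lc',
        dfsLoop g (F + cost g f n p) ((n, p) :: rest) vis lc = dfsLoop g F rest vis' lc' ∧
        (∀ m, m ∈ vis' ↔ m ∈ vis ∨ m ∈ w) ∧
        (∀ m, lc'.get? m = ((upds g f n p).lookup m).or (lc.get? m)) := by
  intro f
  induction f with
  | zero => intro n p w h; simp [walkT] at h
  | succ f IH =>
    intro n p w h hnd hso hp vis hdisj lc rest F
    simp only [walkT, Option.map_eq_some_iff] at h
    obtain ⟨ws, hws, rfl⟩ := h
    have h₂ := mapM_option_forall₂ _ _ _ hws
    have hndc := List.nodup_cons.mp hnd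
    have hsoflat : SelfOK g ws.flatten := fun m hm => hso m (by simp [hm])
    have hnvis : n ∉ vis := hdisj n (by simp)
    by_cases hself : n ∈ g.getD n []
    · -- ===== pure self-loop node =====
      have hall : ∀ x ∈ g.getD n [], x = n := hso n (by simp) hself
      have hc2 : chl2 g n p = [] := pure_chl2 g n p hall
      have hk0 : chl g n p = g.getD n [] := pure_chl g n p hall hp
      -- the walk is [n]
      have hws0 : ws = [] := by
        rw [hc2] at hws
        simpa using hws.symm
      subst hws0
      have hkpos : 1 ≤ (g.getD n []).length := List.length_pos_of_mem hself
      have hcost : cost g (f + 1) n p = ((g.getD n []).length + 2) := by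
        simp only [cost, hc2, hk0, List.map_nil, List.sum_nil, add_zero]
        rw [List.count_eq_length.mpr (fun b hb => (hall b hb).symm)]
        omega
      have hcnt := pure_cnt g f n p hp hself hall
      refine ⟨PySem.Set.add vis n, lc.insert n ((g.getD n []).length : Int), ?_, ?_, ?_⟩
      · rw [hcost, show F + ((g.getD n []).length + 2) = (((F + 1) + (g.getD n []).length) + 1) from by omega]
        simp only [dfsLoop]
        rw [if_pos hnvis]
        -- the pushed frames are k copies of (n, some n)
        have hpush : (g.getD n []).foldl
            (fun st nb => if some nb ≠ p then (nb, some n) :: st else st) ((n, p) :: rest)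
            = List.replicate (g.getD n []).length (n, some n) ++ (n, p) :: rest := by
          rw [foldl_ite_filter p (fun nb st => (nb, some n) :: st)]
          rw [show ((g.getD n []).filter (fun m => some m ≠ p)) = chl g n p from rfl, hk0]
          rw [List.foldl_flip_cons_eq_append]
          have hmapr : (g.getD n []).map (fun c => (c, some n))
              = List.replicate (g.getD n []).length ((n : Int), some n) := by
            apply List.eq_replicate_iff.mpr
            constructor
            · rw [List.length_map]
            · intro b hb
              obtain ⟨x, hx, rfl⟩ := List.mem_map.mp hb
              rw [hall x hx]
          rw [hmapr, List.reverse_replicate]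
        rw [hpush]
        have hmemadd : n ∈ PySem.Set.add vis n :=
          (PySem.Set.mem_add vis n n).mpr (Or.inr rfl)
        rw [pure_frames g n hall (g.getD n []).length (F + 1) ((n, p) :: rest) (PySem.Set.add vis n) _ hmemadd]
        rw [if_neg (by omega)]
        simp only [dfsLoop]
        rw [if_neg (fun hc => hc hmemadd)]
        have hgd : ((lc.insert n (if (g.getD n []).length = 1 ∧ p ≠ none then 1 else 0)).insert n 1).getD n 0 = 1 :=
          PySem.Dict.getD_insert_self _ _ _ _
        rw [pure_count_fold g n p hall hp _ hgd]
        have hkne : (((g.getD n []).length : Nat) : Int) ≠ 0 := by omega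
        rw [if_neg hkne]
        rw [PySem.Dict.insert_insert_self, PySem.Dict.insert_insert_self]
      · intro m
        rw [PySem.Set.mem_add]
        simp
      · intro m
        rw [PySem.Dict.get?_insert]
        simp only [upds, hc2, List.flatMap_nil]
        by_cases hm : m = n
        · subst hm
          rw [if_pos rfl, hcnt]
          simp [List.lookup]
        · have hb : ((m == n) : Bool) = false := by simp [hm]
          rw [if_neg hm]
          simp [List.lookup, hb]
    · -- ===== self-free node =====
      have hchl : chl2 g n p = chl g n p := selffree_chl2 g n p hself
      have hne2 : ∀ c ∈ chl2 g n p, c ≠ n := by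
        intro c hc
        unfold chl2 at hc
        simpa using List.of_mem_filter hc
      have hrev : List.Forall₂ (fun c wc => walkT g f c (some n) = some wc)
          (chl2 g n p).reverse ws.reverse := List.forall₂_reverse_iff.mpr h₂
      have hperm : ws.reverse.flatten.Perm ws.flatten := (List.reverse_perm ws).flatten
      have hndrev : ws.reverse.flatten.Nodup := hperm.nodup_iff.mpr hndc.2
      have hsorev : SelfOK g ws.reverse.flatten :=
        fun m hm => hsoflat m (hperm.mem_iff.mp hm)
      have hpush : (g.getD n []).foldl
          (fun st nb => if some nb ≠ p then (nb, some n) :: st else st) ((n, p) :: rest)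
          = ((chl2 g n p).reverse.map (fun c => (c, some n))) ++ (n, p) :: rest := by
        rw [foldl_ite_filter p (fun nb st => (nb, some n) :: st)]
        rw [show ((g.getD n []).filter (fun m => some m ≠ p)) = chl g n p from rfl, ← hchl]
        rw [List.foldl_flip_cons_eq_append, ← List.map_reverse]
      have hdisj₁ : ∀ m ∈ ws.reverse.flatten, m ∉ PySem.Set.add vis n := by
        intro m hm hin
        have hmf : m ∈ ws.flatten := hperm.mem_iff.mp hm
        rcases (PySem.Set.mem_add vis n m).mp hin with hv | rfl
        · exact hdisj m (by simp [hmf]) hv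
        · exact hndc.1 hmf
      obtain ⟨vis₂, lc₂, eq₂, mem₂, look₂⟩ :=
        frames_sim g f n (fun n' p' w' h' => IH n' p' w' h') (chl2 g n p).reverse ws.reverse hrev
          hndrev hsorev (fun c hc => hne2 c (by simpa using hc)) (PySem.Set.add vis n) hdisj₁
          (lc.insert n (if (g.getD n []).length = 1 ∧ p ≠ none then 1 else 0))
          ((n, p) :: rest) (F + 1)
      have hnvis₂ : n ∈ vis₂ := (mem₂ n).mpr (Or.inl ((PySem.Set.mem_add vis n n).mpr (Or.inr rfl)))
      have hcount : (g.getD n []).foldl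
          (fun c nb => if some nb ≠ p then c + lc₂.getD nb 0 else c) 0
          = ((chl2 g n p).map (fun c => cnt g f c (some n))).sum := by
        rw [foldl_ite_filter p (fun nb c => c + lc₂.getD nb 0)]
        rw [show ((g.getD n []).filter (fun m => some m ≠ p)) = chl g n p from rfl, ← hchl]
        rw [PySem.List.foldl_add (chl2 g n p) (fun nb => lc₂.getD nb 0) 0, zero_add]
        congr 1
        apply List.map_congr_left
        intro c hc
        have hlook : ((chl2 g n p).reverse.flatMap (fun c => upds g f c (some n))).lookup c
            = some (cnt g f c (some n)) :=
          lookup_flatMap_self g f n (chl2 g n p).reverse ws.reverse hrev hndrev c (by simpa using hc)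
        rw [PySem.Dict.getD_eq_get?_getD, look₂ c, hlook]
        rfl
      have hcnt0 : ((chl g n p).count n : Int) = 0 := by
        rw [selffree_count g n p hself]; rfl
      refine ⟨vis₂, lc₂.insert n (if ((g.getD n []).foldl
          (fun c nb => if some nb ≠ p then c + lc₂.getD nb 0 else c) 0) = 0 then 1
          else ((g.getD n []).foldl (fun c nb => if some nb ≠ p then c + lc₂.getD nb 0 else c) 0)),
        ?_, ?_, ?_⟩
      · have e1 : F + cost g (f + 1) n p
            = ((F + 1) + ((chl2 g n p).reverse.map (fun c => cost g f c (some n))).sum) + 1 := by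
          simp only [cost, List.map_reverse, List.sum_reverse]
          rw [selffree_count g n p hself]
          omega
        rw [e1]
        simp only [dfsLoop]
        rw [if_pos hnvis]
        rw [hpush, eq₂]
        simp only [dfsLoop]
        rw [if_neg (fun hc => hc hnvis₂)]
      · intro m
        rw [mem₂ m]
        simp only [PySem.Set.mem_add, List.mem_cons]
        constructor
        · rintro ((hv | rfl) | hmf)
          · exact Or.inl hv
          · exact Or.inr (Or.inl rfl)
          · exact Or.inr (Or.inr (hperm.mem_iff.mp hmf))
        · rintro (hv | rfl | hmf)
          · exact Or.inl (Or.inl hv)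
          · exact Or.inl (Or.inr rfl)
          · exact Or.inr (hperm.mem_iff.mpr hmf)
      · intro m
        rw [PySem.Dict.get?_insert]
        by_cases hm : m = n
        · subst hm
          rw [if_pos rfl]
          simp only [upds, List.lookup, BEq.rfl, cnt, hcount, hcnt0, add_zero]
          simp
        · rw [if_neg hm, look₂ m]
          have hb : ((m == n) : Bool) = false := by simp [hm]
          simp only [upds, List.lookup, hb]
          have hperm2 : ((chl2 g n p).flatMap (fun c => upds g f c (some n))).Perm
              ((chl2 g n p).reverse.flatMap (fun c => upds g f c (some n))) := by
            rw [List.flatMap_def, List.flatMap_def, List.map_reverse]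
            exact ((List.reverse_perm ((chl2 g n p).map (fun c => upds g f c (some n)))).flatten).symm
          rw [← lookup_perm_of_nodup hperm2
            (by rw [upds_keys_flatMap g f n _ _ h₂]; exact hndc.2) m]
          rw [PySem.Dict.get?_insert, if_neg hm]


theorem dfsLoop_nil (g : PySem.Dict Int (List Int)) (F : Nat) (vis : PySem.Set Int)
    (lc : PySem.Dict Int Int) : dfsLoop g F [] vis lc = lc := by
  cases F <;> rfl

theorem getD_len_le (L : List (Int × List Int)) (m : Int) :
    ((PySem.Dict.mk L).getD m []).length ≤ (L.map (fun q => q.2.length)).sum := by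
  induction L with
  | nil =>
    rw [PySem.Dict.getD_eq_get?_getD, get?_mk_eq_lookup]
    simp
  | cons a t ih =>
    rcases a with ⟨a, b⟩
    rw [PySem.Dict.getD_eq_get?_getD, get?_mk_eq_lookup, List.lookup]
    rw [PySem.Dict.getD_eq_get?_getD, get?_mk_eq_lookup] at ih
    cases hab : (m == a) with
    | true => simp
    | false =>
      simp only [List.map_cons, List.sum_cons]
      omega

theorem cost_le (g : PySem.Dict Int (List Int)) (T : Nat)
    (hT : ∀ n, (g.getD n []).length ≤ T) :
    ∀ f n p w, walkT g f n p = some w → cost g f n p ≤ w.length * (2 + T) := by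
  intro f
  induction f with
  | zero => intro n p w h; simp [walkT] at h
  | succ f ih =>
    intro n p w h
    simp only [walkT, Option.map_eq_some_iff] at h
    obtain ⟨ws, hws, rfl⟩ := h
    have h₂ := mapM_option_forall₂ _ _ _ hws
    have hsum : ∀ cs wss, List.Forall₂ (fun c wc => walkT g f c (some n) = some wc) cs wss →
        (cs.map (fun c => cost g f c (some n))).sum ≤ wss.flatten.length * (2 + T) := by
      intro cs wss h2
      induction h2 with
      | nil => simp
      | @cons c0 wc cs' ws' hc0 hF ih₂ =>
        simp only [List.map_cons, List.sum_cons, List.flatten_cons, List.length_append]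
        have h1 := ih _ _ _ hc0
        have : (wc.length + ws'.flatten.length) * (2 + T)
            = wc.length * (2 + T) + ws'.flatten.length * (2 + T) := by ring
        omega
    have hcount : (chl g n p).count n ≤ T := by
      have h1 : (chl g n p).count n ≤ (chl g n p).length := List.count_le_length
      have h2 : (chl g n p).length ≤ (g.getD n []).length := List.length_filter_le _ _
      have := hT n
      omega
    have hsum2 := hsum _ _ h₂
    simp only [cost, List.length_cons]
    have : (ws.flatten.length + 1) * (2 + T)
        = (2 + T) + ws.flatten.length * (2 + T) := by ring
    omega

-- ===== VERDICT (by name: the statement is the Claim_ definition above) =====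
theorem dfs_spec : Claim_equal_dfs := by
  intro start_node graph leaf_count _ hpre
  obtain ⟨hsome, hnd0, hkeys0, hso0⟩ := hpre
  obtain ⟨w, hw⟩ := Option.isSome_iff_exists.mp hsome
  rw [hw] at hnd0 hkeys0 hso0
  simp only [Option.getD_some] at hnd0 hkeys0 hso0
  set g := PySem.Dict.mk graph with hg
  set T := (graph.map (fun q => q.2.length)).sum with hT
  -- the walk stays within the keys, so its length is at most graph.length
  have hsub : w ⊆ graph.map Prod.fst := by
    intro m hm
    have := hkeys0 m hm
    rw [PySem.Dict.contains_iff_mem_keys] at this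
    simpa [PySem.Dict.keys] using this
  have hlen : w.length ≤ graph.length := by
    have := (List.Nodup.subperm hnd0 hsub).length_le
    simpa using this
  have hcost : cost g (graph.length + 1) start_node none ≤ 2 * (graph.length + 1) * (T + 1) := by
    have h1 := cost_le g T (fun n => getD_len_le graph n) (graph.length + 1) start_node none w hw
    have h2 : w.length * (2 + T) ≤ graph.length * (2 + T) :=
      Nat.mul_le_mul_right _ hlen
    nlinarith
  have hso : SelfOK g w := hso0
  have hp0 : (none : Option Int) ≠ some start_node := by simp
  obtain ⟨vis', lc', heq, hmem, hlook⟩ :=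
    loop_sim g (graph.length + 1) start_node none w hw hnd0 hso hp0 PySem.Set.empty
      (by intro m _ hin; simp [PySem.Set.empty] at hin)
      (PySem.Dict.mk leaf_count) []
      (2 * (graph.length + 1) * (T + 1) - cost g (graph.length + 1) start_node none)
  have hfuel : (2 * (graph.length + 1) * (T + 1) - cost g (graph.length + 1) start_node none)
      + cost g (graph.length + 1) start_node none = 2 * (graph.length + 1) * (T + 1) := by
    omega
  show dfs start_node graph leaf_count = dfs_alt start_node graph leaf_count
  have hA : dfs start_node graph leaf_count = cnt g (graph.length + 1) start_node none := by
    show (dfsLoop g (2 * (graph.length + 1) * (T + 1)) [(start_node, none)]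
        PySem.Set.empty (PySem.Dict.mk leaf_count)).getD start_node 0 = _
    rw [← hfuel, heq, dfsLoop_nil]
    rw [PySem.Dict.getD_eq_get?_getD, hlook start_node,
      lookup_upds_self g (graph.length + 1) start_node none w hw]
    rfl
  have hB : dfs_alt start_node graph leaf_count = cnt g (graph.length + 1) start_node none := by
    have hfr : (graph.length + 1) + 1 ≤ (graph.length + 2) * (graph.length + 2) :=
      Nat.le_mul_of_pos_right _ (by omega)
    exact (recB_spec g (graph.length + 1) start_node none w (PySem.Dict.mk leaf_count)
      ((graph.length + 2) * (graph.length + 2)) hw hnd0 hso hp0 hfr).1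
  rw [hA, hB]
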